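-- pv_equiv track=rewrite | github.com/CHOWMHALVIN/Piano-Fingering-Suggestion-Model-with-Intuitive-UI | Evaluation.py | max_consecutive_matches_mismatches
-- ===== SOURCE A (Python) =====
-- def max_consecutive_matches_mismatches(actual, predicted):
--     """Find the maximum consecutive matches and mismatches in a sequence.
--
--     Args:
--         actual (list): Actual finger sequence
--         predicted (list): Predicted finger sequence
--
--     Returns:
--         tuple: (max_consecutive_matches, max_consecutive_mismatches)
--     """
--     max_consecutive_matches = 0
--     max_consecutive_mismatches = 0
--     current_consecutive_matches = 0
--     current_consecutive_mismatches = 0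
--
--     for a, p in zip(actual, predicted):
--         if a == p:
--             current_consecutive_matches += 1
--             max_consecutive_matches = max(max_consecutive_matches, current_consecutive_matches)
--             current_consecutive_mismatches = 0
--         else:
--             current_consecutive_mismatches += 1
--             max_consecutive_mismatches = max(max_consecutive_mismatches, current_consecutive_mismatches)
--             current_consecutive_matches = 0
--
--     return max_consecutive_matches, max_consecutive_mismatches
-- ===== SOURCE B (Python) =====
-- def _runs(bs):
--     """Group a boolean list into maximal runs, returning [(value, length), ...]."""
--     runs = []
--     i = 0
--     while i < len(bs):
--         v = bs[i]
--         k = i + 1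
--         while k < len(bs) and bs[k] == v:
--             k += 1
--         runs.append((v, k - i))
--         i = k
--     return runs
--
--
-- def max_consecutive_matches_mismatches(actual, predicted):
--     """Group the equality stream into maximal runs, then aggregate run lengths."""
--     bools = [a == p for a, p in zip(actual, predicted)]
--     runs = _runs(bools)
--     max_match = max((n for v, n in runs if v), default=0)
--     max_mismatch = max((n for v, n in runs if not v), default=0)
--     return max_match, max_mismatch
-- ===== Notes on version B (the rewrite author's own statement) =====
-- stated objective: alternative
-- what changed: A's single scan with two running counters and two running maxima is replaced by a group-then-aggregate decomposition: build the boolean equality stream, split it into maximal runs (value, length), then take the max of the True-run lengths and of the False-run lengths separately.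
import Mathlib
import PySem

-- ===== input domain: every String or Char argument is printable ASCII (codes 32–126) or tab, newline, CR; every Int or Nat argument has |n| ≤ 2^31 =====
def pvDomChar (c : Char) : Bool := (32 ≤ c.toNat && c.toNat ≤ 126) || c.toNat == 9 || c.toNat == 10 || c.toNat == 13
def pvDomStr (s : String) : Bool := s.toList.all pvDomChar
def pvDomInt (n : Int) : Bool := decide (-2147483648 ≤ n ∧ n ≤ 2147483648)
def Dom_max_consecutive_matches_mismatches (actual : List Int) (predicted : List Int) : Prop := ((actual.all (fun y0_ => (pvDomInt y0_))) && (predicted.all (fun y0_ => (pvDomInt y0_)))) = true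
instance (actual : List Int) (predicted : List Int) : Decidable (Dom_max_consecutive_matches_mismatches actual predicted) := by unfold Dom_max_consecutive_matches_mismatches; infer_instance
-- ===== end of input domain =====

-- B replaces A's running-counter-with-reset loop by a group-into-maximal-runs pass
-- followed by two max aggregations over the run lengths (objective: alternative decomposition).

-- ===== PORT A =====
-- A's loop: state (max_matches, max_mismatches, cur_matches, cur_mismatches), one step per zipped pair.
def max_consecutive_matches_mismatches (actual : List Int) (predicted : List Int) : Int × Int :=
  let r := (actual.zip predicted).foldl
    (fun (st : Int × Int × Int × Int) (ap : Int × Int) =>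
      if ap.1 == ap.2 then
        (max st.1 (st.2.2.1 + 1), st.2.1, st.2.2.1 + 1, 0)
      else
        (st.1, max st.2.1 (st.2.2.2 + 1), 0, st.2.2.2 + 1))
    (0, 0, 0, 0)
  (r.1, r.2.1)

-- ===== PORT B =====
-- Source B's _runs: split a boolean list into maximal runs [(value, length), ...];
-- the outer while loop becomes recursion over the remaining suffix, the inner
-- while loop counting the equal prefix becomes takeWhile, advancing i becomes drop.
def pvRunsB : List Bool → List (Bool × Int)
  | [] => []
  | v :: rest =>
    let t := rest.takeWhile (· == v)
    (v, (1 : Int) + t.length) :: pvRunsB (rest.drop t.length)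
  termination_by bs => bs.length
  decreasing_by simp [List.length_drop]

-- Source B: bools = [a == p ...]; runs = _runs(bools); max(..., default=0) over each kind of run.
def max_consecutive_matches_mismatches_alt (actual : List Int) (predicted : List Int) : Int × Int :=
  let bools := (actual.zip predicted).map (fun ap => ap.1 == ap.2)
  let runs := pvRunsB bools
  let matchLens := runs.filterMap (fun r => if r.1 then some r.2 else none)
  let mismatchLens := runs.filterMap (fun r => if r.1 then none else some r.2)
  ((PySem.List.max? matchLens (fun x => x)).getD 0,
   (PySem.List.max? mismatchLens (fun x => x)).getD 0)

-- ===== PRECONDITION & SPEC =====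
def Spec_max_consecutive_matches_mismatches (actual : List Int) (predicted : List Int) (out : Int × Int) : Prop := out = max_consecutive_matches_mismatches_alt actual predicted
instance (actual : List Int) (predicted : List Int) (out : Int × Int) : Decidable (Spec_max_consecutive_matches_mismatches actual predicted out) := by unfold Spec_max_consecutive_matches_mismatches; infer_instance

-- ===== CLAIM (what is proved, stated in full; the proofs are below) =====
def Claim_equal_max_consecutive_matches_mismatches : Prop := ∀ (actual : List Int) (predicted : List Int), Dom_max_consecutive_matches_mismatches actual predicted → Spec_max_consecutive_matches_mismatches actual predicted (max_consecutive_matches_mismatches actual predicted)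

-- ===== LEMMAS AND PROOFS =====

-- A's loop step, expressed on the boolean equality stream.
def pvStep (st : Int × Int × Int × Int) (b : Bool) : Int × Int × Int × Int :=
  if b then (max st.1 (st.2.2.1 + 1), st.2.1, st.2.2.1 + 1, 0)
  else (st.1, max st.2.1 (st.2.2.2 + 1), 0, st.2.2.2 + 1)

-- best true-run length of bs given a current streak c of trues just before bs
def pvFT : Int → List Bool → Int
  | c, [] => c
  | c, true :: bs => max (c + 1) (pvFT (c + 1) bs)
  | _, false :: bs => pvFT 0 bs

-- best false-run length, symmetric
def pvFF : Int → List Bool → Int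
  | c, [] => c
  | _, true :: bs => pvFF 0 bs
  | c, false :: bs => max (c + 1) (pvFF (c + 1) bs)

lemma pvFT_nonneg : ∀ (bs : List Bool) (c : Int), 0 ≤ c → 0 ≤ pvFT c bs := by
  intro bs
  induction bs with
  | nil => intro c hc; simpa [pvFT] using hc
  | cons b bs ih =>
    intro c hc
    cases b
    · simpa [pvFT] using ih 0 le_rfl
    · simp only [pvFT]
      have := ih (c + 1) (by omega)
      omega

lemma pvFF_nonneg : ∀ (bs : List Bool) (c : Int), 0 ≤ c → 0 ≤ pvFF c bs := by
  intro bs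
  induction bs with
  | nil => intro c hc; simpa [pvFF] using hc
  | cons b bs ih =>
    intro c hc
    cases b
    · simp only [pvFF]
      have := ih (c + 1) (by omega)
      omega
    · simpa [pvFF] using ih 0 le_rfl

-- characterization of A's loop
lemma pvLoopA_char : ∀ (bs : List Bool) (mM mMM cM cMM : Int),
    0 ≤ cM → cM ≤ mM → 0 ≤ cMM → cMM ≤ mMM →
    (bs.foldl pvStep (mM, mMM, cM, cMM)).1 = max mM (pvFT cM bs) ∧
    (bs.foldl pvStep (mM, mMM, cM, cMM)).2.1 = max mMM (pvFF cMM bs) := by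
  intro bs
  induction bs with
  | nil =>
    intro mM mMM cM cMM h1 h2 h3 h4
    constructor <;> simp [pvFT, pvFF] <;> omega
  | cons b bs ih =>
    intro mM mMM cM cMM h1 h2 h3 h4
    cases b
    · -- false step
      have hih := ih mM (max mMM (cMM + 1)) 0 (cMM + 1) le_rfl (by omega) (by omega) (le_max_right _ _)
      simp only [List.foldl_cons, pvStep, Bool.false_eq_true, if_false]
      refine ⟨?_, ?_⟩
      · rw [hih.1]; simp [pvFT]
      · rw [hih.2]; simp only [pvFF]; rw [max_assoc]
    · -- true step
      have hih := ih (max mM (cM + 1)) mMM (cM + 1) 0 (by omega) (le_max_right _ _) le_rfl (by omega)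
      simp only [List.foldl_cons, pvStep, if_true]
      refine ⟨?_, ?_⟩
      · rw [hih.1]; simp only [pvFT]; rw [max_assoc]
      · rw [hih.2]; simp [pvFF]

-- runs helpers -------------------------------------------------------------

lemma pvTakeWhile_replicate : ∀ (l : List Bool) (v : Bool),
    ∃ k, l.takeWhile (· == v) = List.replicate k v := by
  intro l v
  induction l with
  | nil => exact ⟨0, rfl⟩
  | cons a l ih =>
    by_cases h : a = v
    · obtain ⟨k, hk⟩ := ih
      subst h
      exact ⟨k + 1, by simp [List.takeWhile_cons, hk, List.replicate_succ]⟩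
    · exact ⟨0, by simp [List.takeWhile_cons, h]⟩

lemma pvDrop_takeWhile_head : ∀ (l : List Bool) (v : Bool),
    (l.drop (l.takeWhile (· == v)).length).head? ≠ some v := by
  intro l v
  induction l with
  | nil => simp
  | cons a l ih =>
    by_cases h : a = v
    · subst h
      simpa [List.takeWhile_cons] using ih
    · simp [List.takeWhile_cons, h]

lemma pvDrop_takeWhile_append : ∀ (l : List Bool) (v : Bool),
    l.takeWhile (· == v) ++ l.drop (l.takeWhile (· == v)).length = l := by
  intro l v
  induction l with
  | nil => simp
  | cons a l ih =>
    by_cases h : a = v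
    · subst h
      simpa [List.takeWhile_cons] using ih
    · simp [List.takeWhile_cons, h]

-- pvFT over a run of k trues followed by l
lemma pvFT_rep_true : ∀ (k : ℕ) (c : Int) (l : List Bool),
    pvFT c (List.replicate (k + 1) true ++ l) = max (c + (k + 1)) (pvFT (c + (k + 1)) l) := by
  intro k
  induction k with
  | zero => intro c l; simp [List.replicate_succ, pvFT]
  | succ k ih =>
    intro c l
    rw [List.replicate_succ]
    simp only [List.cons_append, pvFT]
    rw [ih]
    have h1 : c + 1 + ((k : Int) + 1) = c + ((k : Int) + 1 + 1) := by ring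
    rw [h1, ← max_assoc]
    have h2 : max (c + 1) (c + ((k : Int) + 1 + 1)) = c + ((k : Int) + 1 + 1) := by omega
    rw [h2]
    push_cast
    ring_nf

lemma pvFT_rep_false : ∀ (k : ℕ) (c : Int) (l : List Bool),
    pvFT c (List.replicate (k + 1) false ++ l) = pvFT 0 l := by
  intro k
  induction k with
  | zero => intro c l; simp [List.replicate_succ, pvFT]
  | succ k ih =>
    intro c l
    rw [List.replicate_succ]
    simp only [List.cons_append, pvFT]
    exact ih 0 l

lemma pvFF_rep_false : ∀ (k : ℕ) (c : Int) (l : List Bool),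
    pvFF c (List.replicate (k + 1) false ++ l) = max (c + (k + 1)) (pvFF (c + (k + 1)) l) := by
  intro k
  induction k with
  | zero => intro c l; simp [List.replicate_succ, pvFF]
  | succ k ih =>
    intro c l
    rw [List.replicate_succ]
    simp only [List.cons_append, pvFF]
    rw [ih]
    have h1 : c + 1 + ((k : Int) + 1) = c + ((k : Int) + 1 + 1) := by ring
    rw [h1, ← max_assoc]
    have h2 : max (c + 1) (c + ((k : Int) + 1 + 1)) = c + ((k : Int) + 1 + 1) := by omega
    rw [h2]
    push_cast
    ring_nf

lemma pvFF_rep_true : ∀ (k : ℕ) (c : Int) (l : List Bool),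
    pvFF c (List.replicate (k + 1) true ++ l) = pvFF 0 l := by
  intro k
  induction k with
  | zero => intro c l; simp [List.replicate_succ, pvFF]
  | succ k ih =>
    intro c l
    rw [List.replicate_succ]
    simp only [List.cons_append, pvFF]
    exact ih 0 l

-- when l does not start with true, the current streak does not extend into l
lemma pvFT_head_reset : ∀ (l : List Bool) (x : Int), 0 ≤ x →
    l.head? ≠ some true → max x (pvFT x l) = max x (pvFT 0 l) := by
  intro l x hx hl
  cases l with
  | nil => simp [pvFT]; omega
  | cons b l =>
    cases b
    · simp [pvFT]
    · simp at hl

lemma pvFF_head_reset : ∀ (l : List Bool) (x : Int), 0 ≤ x →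
    l.head? ≠ some false → max x (pvFF x l) = max x (pvFF 0 l) := by
  intro l x hx hl
  cases l with
  | nil => simp [pvFF]; omega
  | cons b l =>
    cases b
    · simp at hl
    · simp [pvFF]

-- max with default over a cons, for a nonneg head
lemma pvMaxD_cons : ∀ (K : Int) (L : List Int), 0 ≤ K →
    ((PySem.List.max? (K :: L) (fun x => x)).getD 0) =
      max K ((PySem.List.max? L (fun x => x)).getD 0) := by
  intro K L hK
  cases L with
  | nil =>
    have hnone : PySem.List.max? ([] : List Int) (fun x => x) = none := by
      rw [PySem.List.max?_eq_none_iff]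
    simp [PySem.List.max?_id_cons, hnone]
    omega
  | cons x L =>
    rw [PySem.List.max?_id_cons, PySem.List.max?_id_cons]
    simp only [Option.getD_some, List.foldl_cons]
    have key : ∀ (l : List Int) (a b : Int), List.foldl max (max a b) l = max a (List.foldl max b l) := by
      intro l
      induction l with
      | nil => intro a b; simp
      | cons c l ih =>
        intro a b
        simp only [List.foldl_cons]
        rw [max_assoc, ih]
    exact key L K x

-- the B-side aggregations, as proof abbreviations
def pvBT (bs : List Bool) : Int :=
  ((PySem.List.max? ((pvRunsB bs).filterMap (fun r => if r.1 then some r.2 else none)) (fun x => x)).getD 0)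
def pvBF (bs : List Bool) : Int :=
  ((PySem.List.max? ((pvRunsB bs).filterMap (fun r => if r.1 then none else some r.2)) (fun x => x)).getD 0)

lemma pvRunsB_cons (v : Bool) (rest : List Bool) :
    pvRunsB (v :: rest) =
      (v, (1 : Int) + (rest.takeWhile (· == v)).length) ::
        pvRunsB (rest.drop (rest.takeWhile (· == v)).length) := by
  rw [pvRunsB]

-- cons-step equations for the B-side aggregations
lemma pvBT_cons_true (rest : List Bool) :
    pvBT (true :: rest) =
      max (1 + ((rest.takeWhile (· == true)).length : Int))
        (pvBT (rest.drop (rest.takeWhile (· == true)).length)) := by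
  unfold pvBT
  rw [pvRunsB_cons]
  simp only [List.filterMap_cons, if_true]
  exact pvMaxD_cons _ _ (by positivity)

lemma pvBT_cons_false (rest : List Bool) :
    pvBT (false :: rest) = pvBT (rest.drop (rest.takeWhile (· == false)).length) := by
  unfold pvBT
  rw [pvRunsB_cons]
  simp only [List.filterMap_cons, Bool.false_eq_true, if_false]

lemma pvBF_cons_false (rest : List Bool) :
    pvBF (false :: rest) =
      max (1 + ((rest.takeWhile (· == false)).length : Int))
        (pvBF (rest.drop (rest.takeWhile (· == false)).length)) := by
  unfold pvBF
  rw [pvRunsB_cons]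
  simp only [List.filterMap_cons, Bool.false_eq_true, if_false]
  exact pvMaxD_cons _ _ (by positivity)

lemma pvBF_cons_true (rest : List Bool) :
    pvBF (true :: rest) = pvBF (rest.drop (rest.takeWhile (· == true)).length) := by
  unfold pvBF
  rw [pvRunsB_cons]
  simp only [List.filterMap_cons, if_true]

-- main B-side characterization, by strong induction on length
lemma pvB_char : ∀ (n : ℕ) (bs : List Bool), bs.length ≤ n →
    pvBT bs = pvFT 0 bs ∧ pvBF bs = pvFF 0 bs := by
  intro n
  induction n with
  | zero =>
    intro bs h
    have hnil : bs = [] := by cases bs <;> simp_all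
    subst hnil
    have hnone : PySem.List.max? ([] : List Int) (fun x => x) = none := by
      rw [PySem.List.max?_eq_none_iff]
    simp [pvBT, pvBF, pvRunsB, pvFT, pvFF, hnone]
  | succ n ih =>
    intro bs h
    cases bs with
    | nil =>
      have hnone : PySem.List.max? ([] : List Int) (fun x => x) = none := by
        rw [PySem.List.max?_eq_none_iff]
      simp [pvBT, pvBF, pvRunsB, pvFT, pvFF, hnone]
    | cons v rest =>
      obtain ⟨k, hk⟩ := pvTakeWhile_replicate rest v
      have hklen : (rest.takeWhile (· == v)).length = k := by rw [hk]; simp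
      have happ := pvDrop_takeWhile_append rest v
      have hhead := pvDrop_takeWhile_head rest v
      have hlen : (rest.drop (rest.takeWhile (· == v)).length).length ≤ n := by
        have h1 : (rest.drop (rest.takeWhile (· == v)).length).length ≤ rest.length := by
          simp
        simp at h; omega
      have ihr := ih _ hlen
      have hdecomp : v :: rest = List.replicate (k + 1) v ++ rest.drop (rest.takeWhile (· == v)).length := by
        rw [List.replicate_succ, List.cons_append, ← hk, happ]
      cases v
      · -- false head: the run feeds the mismatch side, is skipped on the match side
        refine ⟨?_, ?_⟩
        · rw [pvBT_cons_false, ihr.1]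
          conv_rhs => rw [hdecomp]
          rw [pvFT_rep_false]
        · rw [pvBF_cons_false, ihr.2]
          conv_rhs => rw [hdecomp]
          rw [pvFF_rep_false,
            pvFF_head_reset _ _ (by positivity) (by simpa using hhead), hklen]
          congr 1
          omega
      · -- true head: the run feeds the match side, is skipped on the mismatch side
        refine ⟨?_, ?_⟩
        · rw [pvBT_cons_true, ihr.1]
          conv_rhs => rw [hdecomp]
          rw [pvFT_rep_true,
            pvFT_head_reset _ _ (by positivity) (by simpa using hhead), hklen]
          congr 1
          omega
        · rw [pvBF_cons_true, ihr.2]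
          conv_rhs => rw [hdecomp]
          rw [pvFF_rep_true]

-- ===== VERDICT (by name: the statement is the Claim_ definition above) =====
theorem max_consecutive_matches_mismatches_spec : Claim_equal_max_consecutive_matches_mismatches := by
  intro actual predicted _
  unfold Spec_max_consecutive_matches_mismatches
  unfold max_consecutive_matches_mismatches max_consecutive_matches_mismatches_alt
  simp only []
  have hfold :
      (((actual.zip predicted).map (fun ap => ap.1 == ap.2)).foldl pvStep
        (((0 : Int), (0 : Int), (0 : Int), (0 : Int)))) =
      ((actual.zip predicted).foldl
        (fun (st : Int × Int × Int × Int) (ap : Int × Int) =>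
          if ap.1 == ap.2 then
            (max st.1 (st.2.2.1 + 1), st.2.1, st.2.2.1 + 1, 0)
          else
            (st.1, max st.2.1 (st.2.2.2 + 1), 0, st.2.2.2 + 1))
        (0, 0, 0, 0)) := by
    rw [List.foldl_map]
    rfl
  rw [← hfold]
  have hchar := pvLoopA_char ((actual.zip predicted).map (fun ap => ap.1 == ap.2))
    0 0 0 0 le_rfl le_rfl le_rfl le_rfl
  have hB := pvB_char (((actual.zip predicted).map (fun ap => ap.1 == ap.2)).length)
    ((actual.zip predicted).map (fun ap => ap.1 == ap.2)) le_rfl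
  rw [hchar.1, hchar.2]
  have hT := pvFT_nonneg ((actual.zip predicted).map (fun ap => ap.1 == ap.2)) 0 le_rfl
  have hF := pvFF_nonneg ((actual.zip predicted).map (fun ap => ap.1 == ap.2)) 0 le_rfl
  rw [max_eq_right hT, max_eq_right hF, ← hB.1, ← hB.2]
  rfl
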